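-- pv_equiv track=rewrite | github.com/alfredofdlv/Woodblock_Algorithm | mateo.py | remove_complete_lines
-- ===== SOURCE A (Python) =====
-- from copy import deepcopy
--
-- def remove_complete_lines(board, diamonds):
--     """
--     Verifica si hay filas o columnas completas.
--     Si una fila/columna está completamente llena (con 1 en board),
--     se "limpia": se ponen a 0 en board y en diamonds, y se suman los diamantes
--     que había en esa línea.
--     Retorna (new_board, new_diamonds, diamonds_collected).
--     """
--     rows_to_clear = [i for i in range(5) if all(board[i][j] == 1 for j in range(5))]
--     cols_to_clear = [j for j in range(5) if all(board[i][j] == 1 for i in range(5))]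
--
--     diamonds_collected = 0
--     new_board = deepcopy(board)
--     new_diamonds = deepcopy(diamonds)
--
--     # Limpiar filas
--     for i in rows_to_clear:
--         for j in range(5):
--             if new_diamonds[i][j] == 1:
--                 diamonds_collected += 1
--             new_board[i][j] = 0
--             new_diamonds[i][j] = 0
--
--     # Limpiar columnas
--     for j in cols_to_clear:
--         for i in range(5):
--             # Evitamos contar dos veces si ya se limpió en fila
--             if new_diamonds[i][j] == 1:
--                 diamonds_collected += 1
--             new_board[i][j] = 0
--             new_diamonds[i][j] = 0
--
--     return new_board, new_diamonds, diamonds_collected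
-- ===== SOURCE B (Python) =====
-- def remove_complete_lines(board, diamonds):
--     row_full = [all(board[i][j] == 1 for j in range(5)) for i in range(5)]
--     col_full = [all(board[i][j] == 1 for i in range(5)) for j in range(5)]
--
--     def cleared(i, j):
--         return i < 5 and j < 5 and (row_full[i] or col_full[j])
--
--     def wipe(grid):
--         return [[0 if cleared(i, j) else v for j, v in enumerate(row)]
--                 for i, row in enumerate(grid)]
--
--     collected = sum(1 for i in range(5) for j in range(5)
--                     if cleared(i, j) and diamonds[i][j] == 1)
--     return wipe(board), wipe(diamonds), collected
-- ===== Notes on version B (the rewrite author's own statement) =====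
-- stated objective: simpler
-- what changed: B never mutates or clears anything: it precomputes boolean full-row/full-column tables, defines a per-cell predicate cleared(i,j)=row_full[i] or col_full[j], rebuilds both grids as pure comprehensions mapping that predicate over every cell, and counts diamonds with a single sum over the 5x5 grid, whereas A identifies line index lists and then destructively zeroes the copies line by line, relying on the mutated state to avoid double counting at intersections.
import Mathlib
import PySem

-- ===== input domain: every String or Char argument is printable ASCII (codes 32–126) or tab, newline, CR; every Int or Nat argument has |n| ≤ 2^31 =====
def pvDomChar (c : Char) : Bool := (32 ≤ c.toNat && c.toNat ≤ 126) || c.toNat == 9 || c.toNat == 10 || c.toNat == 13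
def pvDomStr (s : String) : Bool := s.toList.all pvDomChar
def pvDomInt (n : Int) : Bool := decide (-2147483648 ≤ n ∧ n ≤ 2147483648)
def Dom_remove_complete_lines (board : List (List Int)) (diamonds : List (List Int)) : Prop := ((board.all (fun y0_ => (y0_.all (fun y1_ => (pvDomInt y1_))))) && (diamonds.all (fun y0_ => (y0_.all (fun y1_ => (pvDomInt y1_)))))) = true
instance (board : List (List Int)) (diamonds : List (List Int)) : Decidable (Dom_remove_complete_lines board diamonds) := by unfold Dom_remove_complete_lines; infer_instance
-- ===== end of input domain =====

-- B replaces A's destructive line-by-line clearing of copied grids (where double-counting at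
-- row/column intersections is avoided only by reading the already-zeroed state) with a pure
-- rebuild: boolean full-row/full-column tables, a per-cell predicate, comprehension maps and one
-- counting sum; objective: simpler. Return-value equivalence only: neither program mutates its arguments.

-- ===== PORT A =====
-- shared cell accessors: pvGet m i j = m[i][j] and pvSet0 m i j = "m[i][j] = 0"
-- (exact within Pre_, where every accessed index is in range)
def pvGet (m : List (List Int)) (i j : Nat) : Int := (m.getD i []).getD j 0
def pvSet0 (m : List (List Int)) (i j : Nat) : List (List Int) := m.modify i (fun row => row.set j 0)

-- rows i with all(board[i][j] == 1 for j in range(5)) / columns j with all(board[i][j] == 1 for i in range(5))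
def pvFullRows (board : List (List Int)) : List Nat :=
  (List.range 5).filter (fun i => (List.range 5).all (fun j => pvGet board i j == 1))
def pvFullCols (board : List (List Int)) : List Nat :=
  (List.range 5).filter (fun j => (List.range 5).all (fun i => pvGet board i j == 1))

def remove_complete_lines (board : List (List Int)) (diamonds : List (List Int)) : List (List Int) × List (List Int) × Int :=
  let rows_to_clear := pvFullRows board
  let cols_to_clear := pvFullCols board
  -- state (diamonds_collected, new_board, new_diamonds); deepcopy = the lists themselves (immutable here)
  let s0 : Int × List (List Int) × List (List Int) := (0, board, diamonds)
  -- Limpiar filas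
  let s1 := rows_to_clear.foldl (fun s i =>
    (List.range 5).foldl (fun t j =>
      (if pvGet t.2.2 i j = 1 then t.1 + 1 else t.1, pvSet0 t.2.1 i j, pvSet0 t.2.2 i j)) s) s0
  -- Limpiar columnas
  let s2 := cols_to_clear.foldl (fun s j =>
    (List.range 5).foldl (fun t i =>
      (if pvGet t.2.2 i j = 1 then t.1 + 1 else t.1, pvSet0 t.2.1 i j, pvSet0 t.2.2 i j)) s) s1
  (s2.2.1, s2.2.2, s2.1)

-- ===== PORT B =====
-- row_full / col_full: boolean tables over range(5)
def pvRowFull (board : List (List Int)) : List Bool :=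
  (List.range 5).map (fun i => (List.range 5).all (fun j => pvGet board i j == 1))
def pvColFull (board : List (List Int)) : List Bool :=
  (List.range 5).map (fun j => (List.range 5).all (fun i => pvGet board i j == 1))

-- cleared(i, j) = i < 5 and j < 5 and (row_full[i] or col_full[j]); the Int indices i, j come
-- from enumerate/range so they are ≥ 0, hence .toNat indexing of the 5-tables is exact here
def pvClearedB (rf cf : List Bool) (i j : Int) : Bool :=
  decide (i < 5) && decide (j < 5) && (rf.getD i.toNat false || cf.getD j.toNat false)

-- wipe(grid) = [[0 if cleared(i, j) else v for j, v in enumerate(row)] for i, row in enumerate(grid)]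
def pvWipe (rf cf : List Bool) (g : List (List Int)) : List (List Int) :=
  (PySem.List.enumerate g).map (fun p =>
    (PySem.List.enumerate p.2).map (fun q => if pvClearedB rf cf p.1 q.1 then 0 else q.2))

def remove_complete_lines_alt (board : List (List Int)) (diamonds : List (List Int)) : List (List Int) × List (List Int) × Int :=
  let rf := pvRowFull board
  let cf := pvColFull board
  -- collected = sum(1 for i in range(5) for j in range(5) if cleared(i, j) and diamonds[i][j] == 1)
  let collected : Int := (PySem.List.pyRange 0 5 1).foldl (fun acc i =>
    (PySem.List.pyRange 0 5 1).foldl (fun acc j =>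
      if pvClearedB rf cf i j && (pvGet diamonds i.toNat j.toNat == 1) then acc + 1 else acc) acc) 0
  (pvWipe rf cf board, pvWipe rf cf diamonds, collected)

-- ===== PRECONDITION & SPEC =====
-- Pre_ excludes boards/diamonds that do not cover a full 5x5 grid: on most of those A's indexing
-- raises IndexError, and on the few where short-circuit evaluation lets A return, B returns too
-- (the bound is the natural 5x5 game domain).
def Pre_remove_complete_lines (board : List (List Int)) (diamonds : List (List Int)) : Prop :=
  5 ≤ board.length ∧ 5 ≤ diamonds.length ∧
  (∀ r ∈ board.take 5, 5 ≤ r.length) ∧ (∀ r ∈ diamonds.take 5, 5 ≤ r.length)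
instance (board : List (List Int)) (diamonds : List (List Int)) : Decidable (Pre_remove_complete_lines board diamonds) := by unfold Pre_remove_complete_lines; infer_instance

def pvWitness_remove_complete_lines : List (List Int) × List (List Int) :=
  ([[1,1,1,1,1],[0,1,0,0,0],[0,1,0,0,0],[0,1,0,0,0],[0,1,0,0,0]],
   [[0,1,0,0,0],[1,0,0,0,0],[0,1,0,0,0],[0,0,0,0,0],[0,0,0,0,1]])

def Spec_remove_complete_lines (board : List (List Int)) (diamonds : List (List Int)) (out : List (List Int) × List (List Int) × Int) : Prop := out = remove_complete_lines_alt board diamonds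
instance (board : List (List Int)) (diamonds : List (List Int)) (out : List (List Int) × List (List Int) × Int) : Decidable (Spec_remove_complete_lines board diamonds out) := by unfold Spec_remove_complete_lines; infer_instance

-- ===== CLAIM (what is proved, stated in full; the proofs are below) =====
def Claim_equal_remove_complete_lines : Prop := ∀ (board : List (List Int)) (diamonds : List (List Int)), Dom_remove_complete_lines board diamonds → Pre_remove_complete_lines board diamonds → Spec_remove_complete_lines board diamonds (remove_complete_lines board diamonds)

-- ===== LEMMAS AND PROOFS =====

-- the cell entry m[i]?[j]? as an Option, and the clearing step A performs per cell
def pvEntry (m : List (List Int)) (i j : Nat) : Option Int := ((m.getD i [])[j]?)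

def pvClearCell (t : Int × List (List Int) × List (List Int)) (c : Nat × Nat) :
    Int × List (List Int) × List (List Int) :=
  (if pvGet t.2.2 c.1 c.2 = 1 then t.1 + 1 else t.1, pvSet0 t.2.1 c.1 c.2, pvSet0 t.2.2 c.1 c.2)

-- the union cell list A walks (rows pass then columns pass), and the plain set-to-zero fold
def pvCells (board : List (List Int)) : List (Nat × Nat) :=
  (pvFullRows board).flatMap (fun i => (List.range 5).map (fun j => (i, j))) ++
  (pvFullCols board).flatMap (fun j => (List.range 5).map (fun i => (i, j)))

def pvSf (M : List (Nat × Nat)) (m : List (List Int)) : List (List Int) :=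
  M.foldl (fun m c => pvSet0 m c.1 c.2) m

lemma pvEntry_set0 (m : List (List Int)) (i' j' i j : Nat) :
    pvEntry (pvSet0 m i' j') i j = (pvEntry m i j).map (fun v => if i' = i ∧ j' = j then 0 else v) := by
  unfold pvEntry pvSet0
  simp only [List.getD_eq_getElem?_getD, List.getElem?_modify]
  by_cases hi : i' = i
  · subst hi
    cases hr : m[i']? with
    | none => simp
    | some row =>
      simp only [Option.getD_some]
      by_cases hj : j' = j
      · subst hj
        simp only [and_self]
        cases hq : row[j']? with
        | none => simp [List.getElem?_eq_none_iff.mp hq]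
        | some v =>
          have hlt : j' < row.length := (List.getElem?_eq_some_iff.mp hq).1
          simp [hlt]
      · simp [hj]
  · simp only [if_neg hi]
    cases hr : m[i]? with
    | none => simp
    | some row => simp [hi]

lemma pvGet_eq_entry (m : List (List Int)) (i j : Nat) : pvGet m i j = (pvEntry m i j).getD 0 := by
  unfold pvGet pvEntry
  simp [List.getD_eq_getElem?_getD]

lemma pvGet_set0_other (m : List (List Int)) (i' j' i j : Nat) (h : ¬ (i' = i ∧ j' = j)) :
    pvGet (pvSet0 m i' j') i j = pvGet m i j := by
  rw [pvGet_eq_entry, pvGet_eq_entry, pvEntry_set0]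
  cases pvEntry m i j <;> simp [h]

-- state-splitting: on a duplicate-free cell list the clearing fold is a count plus two pure zeroing folds
lemma clear_fold_eq (M : List (Nat × Nat)) (hnd : M.Nodup) (k : Int) (b d : List (List Int)) :
    M.foldl pvClearCell (k, b, d) =
      (k + (M.countP (fun c => decide (pvGet d c.1 c.2 = 1)) : Int), pvSf M b, pvSf M d) := by
  induction M generalizing k b d with
  | nil => simp [pvSf]
  | cons a M ih =>
    have hna : a ∉ M := (List.nodup_cons.mp hnd).1
    have hM : M.Nodup := (List.nodup_cons.mp hnd).2
    rw [List.foldl_cons,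
      show pvClearCell (k, b, d) a =
        (if pvGet d a.1 a.2 = 1 then k + 1 else k, pvSet0 b a.1 a.2, pvSet0 d a.1 a.2) from rfl,
      ih hM]
    have hcong : M.countP (fun c => decide (pvGet (pvSet0 d a.1 a.2) c.1 c.2 = 1)) =
        M.countP (fun c => decide (pvGet d c.1 c.2 = 1)) := by
      apply List.countP_congr
      intro c hc
      have hne : ¬ (a.1 = c.1 ∧ a.2 = c.2) := by
        intro hcc
        exact hna (by
          have : a = c := Prod.ext hcc.1 hcc.2
          simpa [this] using hc)
      rw [pvGet_set0_other d a.1 a.2 c.1 c.2 hne]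
    rw [hcong]
    refine Prod.ext ?_ (Prod.ext rfl rfl)
    show (if pvGet d a.1 a.2 = 1 then k + 1 else k) + _ = k + _
    rw [List.countP_cons]
    by_cases h : pvGet d a.1 a.2 = 1
    · simp [h]; ring
    · simp [h]

-- length/shape preservation of the zeroing fold
lemma pvSet0_length (m : List (List Int)) (i j : Nat) : (pvSet0 m i j).length = m.length := by
  simp [pvSet0]

lemma pvSf_length (M : List (Nat × Nat)) (m : List (List Int)) : (pvSf M m).length = m.length := by
  induction M generalizing m with
  | nil => rfl
  | cons a M ih => simpa [pvSf, List.foldl_cons] using (ih (pvSet0 m a.1 a.2)).trans (pvSet0_length m a.1 a.2)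

lemma pvSf_entry (M : List (Nat × Nat)) (m : List (List Int)) (i j : Nat) :
    pvEntry (pvSf M m) i j = (pvEntry m i j).map (fun v => if (i, j) ∈ M then 0 else v) := by
  induction M generalizing m with
  | nil =>
    show pvEntry m i j = _
    cases pvEntry m i j <;> simp
  | cons a M ih =>
    show pvEntry (pvSf M (pvSet0 m a.1 a.2)) i j = _
    rw [ih, pvEntry_set0]
    cases pvEntry m i j with
    | none => simp
    | some v =>
      simp only [Option.map_some]
      congr 1
      by_cases hM : (i, j) ∈ M
      · simp [hM]
      · by_cases ha : (i, j) = a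
        · have : a.1 = i ∧ a.2 = j := by cases ha; exact ⟨rfl, rfl⟩
          simp [this, ha]
        · have : ¬ (a.1 = i ∧ a.2 = j) := by
            intro hcc; exact ha (by cases a; simp_all)
          simp [this, ha]

lemma pvSf_rowlen (M : List (Nat × Nat)) (m : List (List Int)) (i : Nat) :
    ((pvSf M m)[i]?.map List.length) = (m[i]?.map List.length) := by
  induction M generalizing m with
  | nil => rfl
  | cons a M ih =>
    show ((pvSf M (pvSet0 m a.1 a.2))[i]?.map List.length) = _
    rw [ih]
    unfold pvSet0
    rw [List.getElem?_modify]
    cases m[i]? with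
    | none => simp
    | some row =>
      simp only [Option.map_some]
      show some _ = some row.length
      congr 1
      split_ifs <;> simp

-- ===== the wipe side =====

lemma pvWipe_getElem? (rf cf : List Bool) (g : List (List Int)) (i : Nat) :
    (pvWipe rf cf g)[i]? = g[i]?.map (fun row =>
      (PySem.List.enumerate row).map (fun q => if pvClearedB rf cf ((i : Nat) : Int) q.1 then 0 else q.2)) := by
  unfold pvWipe
  rw [List.getElem?_map, PySem.List.getElem?_enumerate]
  cases g[i]? <;> simp

lemma wipe_row_getElem? (rf cf : List Bool) (iI : Int) (row : List Int) (j : Nat) :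
    ((PySem.List.enumerate row).map (fun q => if pvClearedB rf cf iI q.1 then 0 else q.2))[j]? =
      row[j]?.map (fun v => if pvClearedB rf cf iI ((j : Nat) : Int) then 0 else v) := by
  rw [List.getElem?_map, PySem.List.getElem?_enumerate]
  cases row[j]? <;> simp

-- membership in A's union cell list ↔ B's per-cell predicate
lemma mem_cells_iff (board : List (List Int)) (i j : Nat) :
    ((i, j) ∈ pvCells board) ↔ pvClearedB (pvRowFull board) (pvColFull board) (i : Int) (j : Int) = true := by
  unfold pvCells pvFullRows pvFullCols pvRowFull pvColFull pvClearedB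
  simp only [List.mem_append, List.mem_flatMap, List.mem_map, List.mem_filter, List.mem_range,
    Prod.mk.injEq, Bool.and_eq_true, Bool.or_eq_true, decide_eq_true_eq]
  constructor
  · rintro (⟨i', ⟨hi', hfull⟩, j', hj', hij⟩ | ⟨j', ⟨hj', hfull⟩, i', hi', hij⟩)
    · obtain ⟨hii, hjj⟩ := hij
      subst hii; subst hjj
      refine ⟨⟨by exact_mod_cast hi', by exact_mod_cast hj'⟩, Or.inl ?_⟩
      rw [Int.toNat_natCast, List.getD_eq_getElem?_getD, List.getElem?_map,
        List.getElem?_range hi']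
      simpa using hfull
    · obtain ⟨hii, hjj⟩ := hij
      subst hii; subst hjj
      refine ⟨⟨by exact_mod_cast hi', by exact_mod_cast hj'⟩, Or.inr ?_⟩
      rw [Int.toNat_natCast, List.getD_eq_getElem?_getD, List.getElem?_map,
        List.getElem?_range hj']
      simpa using hfull
  · rintro ⟨⟨hi, hj⟩, hor⟩
    have hi' : i < 5 := by exact_mod_cast hi
    have hj' : j < 5 := by exact_mod_cast hj
    rcases hor with h | h
    · left
      refine ⟨i, ⟨hi', ?_⟩, j, hj', rfl, rfl⟩
      rw [Int.toNat_natCast, List.getD_eq_getElem?_getD, List.getElem?_map,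
        List.getElem?_range hi'] at h
      simpa using h
    · right
      refine ⟨j, ⟨hj', ?_⟩, i, hi', rfl, rfl⟩
      rw [Int.toNat_natCast, List.getD_eq_getElem?_getD, List.getElem?_map,
        List.getElem?_range hj'] at h
      simpa using h

-- the deduplicated cell set equals B's wipe, pointwise
lemma sf_eq_wipe (M : List (Nat × Nat)) (rf cf : List Bool) (m : List (List Int))
    (hmem : ∀ i j : Nat, ((i, j) ∈ M) ↔ pvClearedB rf cf (i : Int) (j : Int) = true) :
    pvSf M m = pvWipe rf cf m := by
  apply List.ext_getElem?
  intro i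
  rw [pvWipe_getElem?]
  cases hg : m[i]? with
  | none =>
    have hlen : m.length ≤ i := List.getElem?_eq_none_iff.mp hg
    rw [List.getElem?_eq_none (by rw [pvSf_length]; exact hlen)]
    simp
  | some row =>
    have hlt : i < m.length := (List.getElem?_eq_some_iff.mp hg).1
    have hlt' : i < (pvSf M m).length := by rw [pvSf_length]; exact hlt
    have hr : (pvSf M m)[i]? = some ((pvSf M m)[i]'hlt') := List.getElem?_eq_getElem hlt'
    set r := (pvSf M m)[i]'hlt' with hrdef
    rw [hr, Option.map_some]
    congr 1
    -- rows are equal as lists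
    apply List.ext_getElem?
    intro j
    have hrowlen : r.length = row.length := by
      have := pvSf_rowlen M m i
      rw [hr, hg] at this
      simpa using this
    rw [wipe_row_getElem?]
    have hentry := pvSf_entry M m i j
    unfold pvEntry at hentry
    rw [List.getD_eq_getElem?_getD, List.getD_eq_getElem?_getD, hr, hg] at hentry
    simp only [Option.getD_some] at hentry
    rw [hentry]
    cases row[j]? <;> simp [hmem i j]
  
-- A's state fold equals the fold over the flat union list
lemma nested_foldl_eq_flatMap (rows : List Nat) (f : Nat → List (Nat × Nat))
    (s : Int × List (List Int) × List (List Int)) :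
    rows.foldl (fun s i => (f i).foldl pvClearCell s) s = (rows.flatMap f).foldl pvClearCell s := by
  induction rows generalizing s with
  | nil => rfl
  | cons a l ih => simp [List.flatMap_cons, List.foldl_append, ih]

lemma rowpass (rows : List Nat) (s : Int × List (List Int) × List (List Int)) :
    rows.foldl (fun s i => (List.range 5).foldl (fun t j =>
        (if pvGet t.2.2 i j = 1 then t.1 + 1 else t.1, pvSet0 t.2.1 i j, pvSet0 t.2.2 i j)) s) s
    = (rows.flatMap (fun i => (List.range 5).map (fun j => (i, j)))).foldl pvClearCell s := by
  rw [← nested_foldl_eq_flatMap]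
  simp only [List.foldl_map]
  rfl

lemma colpass (cols : List Nat) (s : Int × List (List Int) × List (List Int)) :
    cols.foldl (fun s j => (List.range 5).foldl (fun t i =>
        (if pvGet t.2.2 i j = 1 then t.1 + 1 else t.1, pvSet0 t.2.1 i j, pvSet0 t.2.2 i j)) s) s
    = (cols.flatMap (fun j => (List.range 5).map (fun i => (i, j)))).foldl pvClearCell s := by
  rw [← nested_foldl_eq_flatMap]
  simp only [List.foldl_map]
  rfl

lemma A_eq_cells_fold (board diamonds : List (List Int)) :
    remove_complete_lines board diamonds =
      (((pvCells board).foldl pvClearCell (0, board, diamonds)).2.1,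
       ((pvCells board).foldl pvClearCell (0, board, diamonds)).2.2,
       ((pvCells board).foldl pvClearCell (0, board, diamonds)).1) := by
  unfold remove_complete_lines
  dsimp only []
  rw [rowpass, colpass,
    show pvCells board =
      (pvFullRows board).flatMap (fun i => (List.range 5).map (fun j => (i, j))) ++
      (pvFullCols board).flatMap (fun j => (List.range 5).map (fun i => (i, j))) from rfl,
    List.foldl_append]

-- duplicates in the cell list are harmless: a cell already zeroed contributes nothing
def pvDone (t : Int × List (List Int) × List (List Int)) (c : Nat × Nat) : Prop :=
  pvGet t.2.1 c.1 c.2 = 0 ∧ pvGet t.2.2 c.1 c.2 = 0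

def pvEdup (seen : List (Nat × Nat)) : List (Nat × Nat) → List (Nat × Nat)
  | [] => []
  | a :: l => if a ∈ seen then pvEdup seen l else a :: pvEdup (seen ++ [a]) l

lemma pvGet_set_self (m : List (List Int)) (i j : Nat) : pvGet (pvSet0 m i j) i j = 0 := by
  rw [pvGet_eq_entry, pvEntry_set0]
  cases pvEntry m i j <;> simp

lemma pvGet_set_zero (m : List (List Int)) (i j i' j' : Nat) (h : pvGet m i j = 0) :
    pvGet (pvSet0 m i' j') i j = 0 := by
  rw [pvGet_eq_entry, pvEntry_set0]
  rw [pvGet_eq_entry] at h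
  cases he : pvEntry m i j with
  | none => simp
  | some v =>
    rw [he] at h
    simp only [Option.getD_some] at h
    subst h
    simp

lemma set_row_zero (l : List Int) (j : Nat) (h : l.getD j 0 = 0) : l.set j 0 = l := by
  apply List.ext_getElem?
  intro q
  rw [List.getElem?_set]
  simp only [List.getD_eq_getElem?_getD] at h
  split_ifs with hq hl
  · subst hq
    rw [List.getElem?_eq_getElem hl] at h ⊢
    simp at h
    simp [h]
  · subst hq
    exact (List.getElem?_eq_none (by omega)).symm
  · rfl

lemma pvSet0_of_zero (m : List (List Int)) (i j : Nat) (h : pvGet m i j = 0) :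
    pvSet0 m i j = m := by
  unfold pvGet at h
  unfold pvSet0
  apply List.ext_getElem?
  intro k
  rw [List.getElem?_modify]
  by_cases hk : i = k
  · subst hk
    cases hr : m[i]? with
    | none => simp
    | some row =>
      simp only [List.getD_eq_getElem?_getD, hr] at h
      simp [set_row_zero row j (by simpa [List.getD_eq_getElem?_getD] using h)]
  · simp [hk]

lemma pvClearCell_done (t : Int × List (List Int) × List (List Int)) (c : Nat × Nat)
    (h : pvDone t c) : pvClearCell t c = t := by
  obtain ⟨h1, h2⟩ := h
  simp [pvClearCell, h2, pvSet0_of_zero _ _ _ h1, pvSet0_of_zero _ _ _ h2]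

lemma pvDone_clear_self (t : Int × List (List Int) × List (List Int)) (c : Nat × Nat) :
    pvDone (pvClearCell t c) c := by
  exact ⟨pvGet_set_self _ _ _, pvGet_set_self _ _ _⟩

lemma pvDone_clear (t : Int × List (List Int) × List (List Int)) (c c' : Nat × Nat)
    (h : pvDone t c) : pvDone (pvClearCell t c') c := by
  exact ⟨pvGet_set_zero _ _ _ _ _ h.1, pvGet_set_zero _ _ _ _ _ h.2⟩

lemma foldl_add_eq_append_edup (l seen : List (Nat × Nat)) :
    l.foldl PySem.Set.add seen = seen ++ pvEdup seen l := by
  induction l generalizing seen with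
  | nil => simp [pvEdup]
  | cons a l ih =>
    by_cases h : a ∈ seen
    · simp [pvEdup, h, PySem.Set.add, ih]
    · simp only [List.foldl_cons, pvEdup, h, if_false]
      rw [show PySem.Set.add seen a = seen ++ [a] by simp [PySem.Set.add, h]]
      rw [ih]
      simp

lemma foldl_edup (l : List (Nat × Nat)) :
    ∀ (seen : List (Nat × Nat)) (s : Int × List (List Int) × List (List Int)),
    (∀ c ∈ seen, pvDone s c) →
    (pvEdup seen l).foldl pvClearCell s = l.foldl pvClearCell s := by
  induction l with
  | nil => intro seen s _; rfl
  | cons a l ih =>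
    intro seen s hseen
    by_cases h : a ∈ seen
    · have ha : pvDone s a := hseen a h
      simp only [pvEdup, h, if_true, List.foldl_cons, pvClearCell_done s a ha]
      exact ih seen s hseen
    · simp only [pvEdup, h, if_false, List.foldl_cons]
      apply ih
      intro c hc
      rcases List.mem_append.mp hc with hc | hc
      · exact pvDone_clear _ _ _ (hseen c hc)
      · simp at hc; subst hc; exact pvDone_clear_self _ _

lemma foldl_ofList_clear (l : List (Nat × Nat)) (s : Int × List (List Int) × List (List Int)) :
    (PySem.Set.ofList l).foldl pvClearCell s = l.foldl pvClearCell s := by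
  rw [PySem.Set.ofList_eq_foldl, foldl_add_eq_append_edup]
  simpa using foldl_edup l [] s (by simp)

-- ===== counting side =====

def pvGrid : List (Nat × Nat) := (List.range 5).flatMap (fun i => (List.range 5).map (fun j => (i, j)))

lemma mem_pvGrid (i j : Nat) : (i, j) ∈ pvGrid ↔ i < 5 ∧ j < 5 := by
  unfold pvGrid
  simp only [List.mem_flatMap, List.mem_map, List.mem_range, Prod.mk.injEq]
  constructor
  · rintro ⟨i', hi', j', hj', rfl, rfl⟩; exact ⟨hi', hj'⟩
  · rintro ⟨hi, hj⟩; exact ⟨i, hi, j, hj, rfl, rfl⟩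

lemma nested_count_foldl (q : Int → Int → Bool) (rows : List Int) (acc : Int) :
    rows.foldl (fun a i => (PySem.List.pyRange 0 5 1).foldl (fun a j => if q i j then a + 1 else a) a) acc =
      acc + ((rows.flatMap (fun i => (PySem.List.pyRange 0 5 1).map (fun j => (i, j)))).countP
        (fun c => q c.1 c.2) : Int) := by
  induction rows generalizing acc with
  | nil => simp
  | cons r rows ih =>
    simp only [List.foldl_cons, List.flatMap_cons, List.countP_append, ih]
    rw [PySem.List.foldl_if_add_one]
    have : (PySem.List.pyRange 0 5 1).countP (fun j => q r j) =
        ((PySem.List.pyRange 0 5 1).map (fun j => (r, j))).countP (fun c => q c.1 c.2) := by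
      rw [List.countP_map]; rfl
    rw [this]
    push_cast
    ring

-- the two counts agree: both count the distinct cleared cells carrying a diamond
lemma count_eq (board diamonds : List (List Int)) :
    ((PySem.Set.ofList (pvCells board)).countP (fun c => decide (pvGet diamonds c.1 c.2 = 1)) : Int) =
      (pvGrid.countP (fun c => pvClearedB (pvRowFull board) (pvColFull board) (c.1 : Int) (c.2 : Int)
        && (pvGet diamonds c.1 c.2 == 1)) : Int) := by
  congr 1
  rw [List.countP_eq_length_filter, List.countP_eq_length_filter]
  apply List.Perm.length_eq
  apply (List.perm_ext_iff_of_nodup (List.Nodup.filter _ (PySem.Set.nodup_ofList _))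
    (List.Nodup.filter _ (by decide))).mpr
  rintro ⟨i, j⟩
  simp only [List.mem_filter, PySem.Set.mem_ofList, decide_eq_true_eq, Bool.and_eq_true, beq_iff_eq]
  rw [mem_cells_iff, mem_pvGrid]
  constructor
  · rintro ⟨hc, hd⟩
    have h5 : i < 5 ∧ j < 5 := by
      unfold pvClearedB at hc
      simp only [Bool.and_eq_true, decide_eq_true_eq] at hc
      exact ⟨by exact_mod_cast hc.1.1, by exact_mod_cast hc.1.2⟩
    exact ⟨h5, hc, hd⟩
  · rintro ⟨_, hc, hd⟩
    exact ⟨hc, hd⟩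

-- ===== assembling the equivalence =====

theorem ports_eq (board diamonds : List (List Int)) :
    remove_complete_lines board diamonds = remove_complete_lines_alt board diamonds := by
  rw [A_eq_cells_fold]
  rw [← foldl_ofList_clear]
  rw [clear_fold_eq _ (PySem.Set.nodup_ofList _) 0 board diamonds]
  unfold remove_complete_lines_alt
  dsimp only []
  have hmem : ∀ i j : Nat, ((i, j) ∈ PySem.Set.ofList (pvCells board)) ↔
      pvClearedB (pvRowFull board) (pvColFull board) (i : Int) (j : Int) = true := by
    intro i j
    rw [PySem.Set.mem_ofList]
    exact mem_cells_iff board i j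
  refine Prod.ext ?_ (Prod.ext ?_ ?_)
  · exact sf_eq_wipe _ _ _ board hmem
  · exact sf_eq_wipe _ _ _ diamonds hmem
  · -- the diamond counts
    show (0 : Int) + _ = _
    rw [zero_add]
    refine (count_eq board diamonds).trans ?_
    have h2 := nested_count_foldl (fun i j =>
      pvClearedB (pvRowFull board) (pvColFull board) i j
        && (pvGet diamonds i.toNat j.toNat == 1)) (PySem.List.pyRange 0 5 1) 0
    have hgrid : (PySem.List.pyRange 0 5 1).flatMap
        (fun i => (PySem.List.pyRange 0 5 1).map (fun j => (i, j))) =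
        pvGrid.map (fun c => ((c.1 : Int), (c.2 : Int))) := by decide
    refine Eq.trans ?_ ((zero_add _).symm.trans h2.symm)
    rw [hgrid, List.countP_map]
    congr 1

-- ===== VERDICT (by name: the statement is the Claim_ definition above) =====
theorem remove_complete_lines_spec : Claim_equal_remove_complete_lines := by
  intro board diamonds _ _
  unfold Spec_remove_complete_lines
  exact (ports_eq board diamonds).symm ▸ rfl
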